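-- pv_equiv track=rewrite | github.com/koii-network/prometheus-beta | src/to_header_case.py | to_header_case
-- ===== SOURCE A (Python) =====
-- def to_header_case(text: str) -> str:
--     """
--     Convert a string to header case (capitalized words with no separators).
--
--     Args:
--         text (str): Input string to convert
--
--     Returns:
--         str: String converted to header case
--
--     Raises:
--         TypeError: If input is not a string
--     """
--     if not isinstance(text, str):
--         raise TypeError("Input must be a string")
--
--     # Handle empty string
--     if not text:
--         return ""
--
--     # Split the string by various possible separators
--     words = []
--     current_word = ""
--     for char in text:
--         if char in [' ', '_', '-']:
--             if current_word:
--                 words.append(current_word)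
--                 current_word = ""
--         else:
--             current_word += char
--
--     # Add the last word
--     if current_word:
--         words.append(current_word)
--
--     # Capitalize or preserve existing capitalization
--     def capitalize_word(word):
--         if word[0].isupper():
--             return word
--         return word.capitalize()
--
--     # Capitalize each word and join
--     return ''.join(capitalize_word(word) for word in words)
-- ===== SOURCE B (Python) =====
-- def to_header_case(text: str) -> str:
--     if not isinstance(text, str):
--         raise TypeError("Input must be a string")
--     if not text:
--         return ""
--     out = []
--     at_word_start = True
--     preserve = False
--     for ch in text:
--         if ch in (' ', '_', '-'):
--             at_word_start = True
--         elif at_word_start: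
--             preserve = ch.isupper()
--             out.append(ch if preserve else ch.upper())
--             at_word_start = False
--         else:
--             out.append(ch if preserve else ch.lower())
--     return ''.join(out)
-- ===== Notes on version B (the rewrite author's own statement) =====
-- stated objective: simpler
-- what changed: Replaced A's tokenize-into-word-list / capitalize-each-word / join pipeline by a single pass over the characters that emits the result directly, tracking only an at_word_start flag and a per-word preserve flag (no word list, no helper).
import Mathlib
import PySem

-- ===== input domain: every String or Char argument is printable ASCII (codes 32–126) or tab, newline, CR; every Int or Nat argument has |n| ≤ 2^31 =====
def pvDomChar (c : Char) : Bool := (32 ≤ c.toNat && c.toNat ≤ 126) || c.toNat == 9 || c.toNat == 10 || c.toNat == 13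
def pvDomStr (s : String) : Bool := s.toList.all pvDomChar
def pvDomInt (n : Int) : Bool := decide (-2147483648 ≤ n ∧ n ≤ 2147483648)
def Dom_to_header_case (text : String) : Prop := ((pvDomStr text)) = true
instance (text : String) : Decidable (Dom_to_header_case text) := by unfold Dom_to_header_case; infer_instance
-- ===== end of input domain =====

-- ===== PORT A =====
-- B fuses A's tokenize/capitalize/join into one pass over the characters (objective: simpler, one pass, no intermediate word list).
-- Python's word.capitalize() / char.isupper() / char.upper() / char.lower(), via PySem.Chars (exact on ASCII).
def capAWord (w : List Char) : List Char :=
  match w with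
  | [] => []
  | c :: r =>
    if PySem.Chars.isupper c then c :: r
    else PySem.Chars.upperChar c :: r.map PySem.Chars.lowerChar

-- literal port of A: fold accumulating (words, current_word), finalize, capitalize each word, join
def to_header_case (text : String) : String :=
  if text = "" then "" else
    let st := text.toList.foldl
      (fun (st : List (List Char) × List Char) c =>
        if c = ' ' ∨ c = '_' ∨ c = '-' then
          if st.2 ≠ [] then (st.1 ++ [st.2], ([] : List Char)) else st
        else (st.1, st.2 ++ [c]))
      ([], [])
    let words := if st.2 ≠ [] then st.1 ++ [st.2] else st.1
    String.ofList ((words.map capAWord).flatten)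

-- ===== PORT B =====
def hcGo (atStart preserve : Bool) : List Char → List Char
  | [] => []
  | c :: cs =>
    if c = ' ' ∨ c = '_' ∨ c = '-' then hcGo true preserve cs
    else if atStart then
      if PySem.Chars.isupper c then c :: hcGo false true cs
      else PySem.Chars.upperChar c :: hcGo false false cs
    else
      (if preserve then c else PySem.Chars.lowerChar c) :: hcGo false preserve cs

def to_header_case_alt (text : String) : String :=
  if text = "" then "" else String.ofList (hcGo true false text.toList)

-- ===== PRECONDITION & SPEC =====
def Spec_to_header_case (text : String) (out : String) : Prop := out = to_header_case_alt text
instance (text : String) (out : String) : Decidable (Spec_to_header_case text out) := by unfold Spec_to_header_case; infer_instance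

-- ===== CLAIM (what is proved, stated in full; the proofs are below) =====
def Claim_equal_to_header_case : Prop := ∀ (text : String), Dom_to_header_case text → Spec_to_header_case text (to_header_case text)

-- ===== LEMMAS AND PROOFS =====
def hcStep (st : List (List Char) × List Char) (c : Char) : List (List Char) × List Char :=
  if c = ' ' ∨ c = '_' ∨ c = '-' then
    if st.2 ≠ [] then (st.1 ++ [st.2], ([] : List Char)) else st
  else (st.1, st.2 ++ [c])

def hcJoin (ws : List (List Char)) : List Char := (ws.map capAWord).flatten

lemma capAWord_append (d : Char) (r : List Char) (c : Char) :
    capAWord ((d :: r) ++ [c])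
      = capAWord (d :: r) ++ [if PySem.Chars.isupper d then c else PySem.Chars.lowerChar c] := by
  simp only [capAWord, List.cons_append]
  by_cases h : PySem.Chars.isupper d = true <;> simp [h]

lemma hcJoin_append (ws : List (List Char)) (w : List Char) :
    hcJoin (ws ++ [w]) = hcJoin ws ++ capAWord w := by
  simp [hcJoin]

lemma hc_main : ∀ (cs : List Char) (words : List (List Char)) (cur : List Char) (p : Bool),
    (∀ d r, cur = d :: r → p = PySem.Chars.isupper d) →
    hcJoin (if (cs.foldl hcStep (words, cur)).2 ≠ [] then
              (cs.foldl hcStep (words, cur)).1 ++ [(cs.foldl hcStep (words, cur)).2]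
            else (cs.foldl hcStep (words, cur)).1)
      = hcJoin words ++ capAWord cur ++ hcGo cur.isEmpty p cs := by
  intro cs
  induction cs with
  | nil =>
    intro words cur p _
    cases cur with
    | nil => simp [hcGo, capAWord]
    | cons d r => simp [hcGo, hcJoin_append]
  | cons c cs ih =>
    intro words cur p hp
    simp only [List.foldl_cons]
    by_cases hsep : c = ' ' ∨ c = '_' ∨ c = '-'
    · cases cur with
      | nil =>
        rw [show hcStep (words, ([] : List Char)) c = (words, []) by simp [hcStep, hsep]]
        rw [ih words [] p (fun d r h => by cases h)]
        simp [hcGo, hsep, capAWord]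
      | cons d r =>
        rw [show hcStep (words, d :: r) c = (words ++ [d :: r], []) by simp [hcStep, hsep]]
        rw [ih (words ++ [d :: r]) [] p (fun d' r' h => by cases h)]
        rw [hcJoin_append]
        simp [hcGo, hsep, capAWord]
    · cases cur with
      | nil =>
        rw [show hcStep (words, ([] : List Char)) c = (words, [c]) by simp [hcStep, hsep]]
        rw [ih words [c] (PySem.Chars.isupper c) (fun d r h => by cases h; rfl)]
        by_cases hu : PySem.Chars.isupper c = true <;>
          simp [hcGo, hsep, capAWord, hu]
      | cons d r =>
        have hpd : p = PySem.Chars.isupper d := hp d r rfl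
        rw [show hcStep (words, d :: r) c = (words, (d :: r) ++ [c]) by simp [hcStep, hsep]]
        rw [ih words ((d :: r) ++ [c]) p (fun d' r' h => by
          rw [List.cons_append] at h
          injection h with h1 h2
          rw [← h1]; exact hpd)]
        rw [capAWord_append]
        cases p with
        | true => simp [hcGo, hsep, ← hpd, List.append_assoc]
        | false => simp [hcGo, hsep, ← hpd, List.append_assoc]

-- ===== VERDICT (by name: the statement is the Claim_ definition above) =====
theorem to_header_case_spec : Claim_equal_to_header_case := by
  intro text _
  unfold Spec_to_header_case to_header_case to_header_case_alt
  by_cases h : text = ""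
  · simp [h]
  · simp only [h, if_false]
    have hmain := hc_main text.toList [] [] false (fun d r h => by cases h)
    simp only [hcJoin, capAWord, List.map_nil, List.flatten_nil, List.nil_append,
      List.isEmpty_nil] at hmain
    rw [show (fun (st : List (List Char) × List Char) c =>
          if c = ' ' ∨ c = '_' ∨ c = '-' then
            if st.2 ≠ [] then (st.1 ++ [st.2], ([] : List Char)) else st
          else (st.1, st.2 ++ [c])) = hcStep from rfl]
    rw [hmain]
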